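-- pv_equiv track=rewrite | github.com/GoodMorninTech/GoodMorningTech | gmt/extras.py | filter_articles
-- ===== SOURCE A (Python) =====
-- def filter_articles(raw_html: str) -> str:
--     """Filters HTML out, which is not enclosed by article-tags.
--     Beautifulsoup is inaccurate and slow when applied on a larger
--     HTML string, this filtration fixes this.
--     """
--     raw_html_lst = raw_html.split("\n")
--
--     # count number of article tags within the document (varies from 0 to 50):
--     article_tags_count = 0
--     tag = "article"
--     for line in raw_html_lst:
--         if tag in line:
--             article_tags_count += 1
--
--     # copy HTML enclosed by first and last article-tag:
--     articles_arrays, is_article = [], False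
--     for line in raw_html_lst:
--         if tag in line:
--             article_tags_count -= 1
--             is_article = True
--         if is_article:
--             articles_arrays.append(line)
--         if not article_tags_count:
--             is_article = False
--     return "".join(articles_arrays)
-- ===== SOURCE B (Python) =====
-- def filter_articles(raw_html: str) -> str:
--     """Return the lines (joined without separators) from the first to the
--     last line containing "article", inclusive; '' if no line contains it."""
--     lines = raw_html.split("\n")
--     idx = [i for i, line in enumerate(lines) if "article" in line]
--     if not idx:
--         return ""
--     return "".join(lines[idx[0]:idx[-1] + 1])
-- ===== Notes on version B (the rewrite author's own statement) =====
-- stated objective: simpler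
-- what changed: A's two passes (count tagged lines, then a count-down/is_article state machine appending line by line) are replaced by collecting the tagged line indices once and returning the inclusive slice from the first to the last tagged line.
import Mathlib
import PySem

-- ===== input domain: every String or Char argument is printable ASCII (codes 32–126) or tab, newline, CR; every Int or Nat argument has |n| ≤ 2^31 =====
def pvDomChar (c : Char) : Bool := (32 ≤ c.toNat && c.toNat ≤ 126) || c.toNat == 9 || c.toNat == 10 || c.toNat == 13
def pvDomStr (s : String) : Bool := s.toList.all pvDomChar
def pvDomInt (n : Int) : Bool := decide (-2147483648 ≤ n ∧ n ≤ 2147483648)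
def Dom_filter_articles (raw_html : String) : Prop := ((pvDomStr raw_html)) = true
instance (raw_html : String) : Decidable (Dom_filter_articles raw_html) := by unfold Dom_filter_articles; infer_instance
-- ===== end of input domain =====

-- B replaces A's count-then-state-machine double pass by collecting the tagged line
-- indices once and returning the inclusive slice from the first to the last (simpler).

-- ===== PORT A =====
def filter_articles (raw_html : String) : String :=
  let raw_html_lst := (PySem.Str.split? raw_html "\n").getD []  -- sep "\n" ≠ "": split? is always some here
  -- first loop: count lines containing the tag
  let article_tags_count : Int := raw_html_lst.foldl
    (fun c line => if PySem.Str.isIn "article" line then c + 1 else c) 0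
  -- second loop: state machine (articles_arrays, article_tags_count, is_article)
  let s := raw_html_lst.foldl
    (fun (s : List String × Int × Bool) line =>
      let acc := s.1
      let c := if PySem.Str.isIn "article" line then s.2.1 - 1 else s.2.1
      let isa := if PySem.Str.isIn "article" line then true else s.2.2
      let acc := if isa then acc ++ [line] else acc
      let isa := if c = 0 then false else isa
      (acc, c, isa))
    ([], article_tags_count, false)
  PySem.Str.join "" s.1

-- ===== PORT B =====
def filter_articles_alt (raw_html : String) : String :=
  let lines := (PySem.Str.split? raw_html "\n").getD []  -- sep "\n" ≠ "": split? is always some here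
  let idx := ((PySem.List.enumerate lines 0).filter
      (fun q => PySem.Str.isIn "article" q.2)).map (·.1)
  match idx with
  | [] => ""
  | i :: rest =>
      PySem.Str.join "" (PySem.List.slice lines (some i)
        (some ((i :: rest).getLast (List.cons_ne_nil i rest) + 1)))

-- ===== PRECONDITION & SPEC =====
def Spec_filter_articles (raw_html : String) (out : String) : Prop := out = filter_articles_alt raw_html
instance (raw_html : String) (out : String) : Decidable (Spec_filter_articles raw_html out) := by unfold Spec_filter_articles; infer_instance

-- ===== CLAIM (what is proved, stated in full; the proofs are below) =====
def Claim_equal_filter_articles : Prop := ∀ (raw_html : String), Dom_filter_articles raw_html → Spec_filter_articles raw_html (filter_articles raw_html)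

-- ===== LEMMAS AND PROOFS =====

-- A's second loop, as a structural recursion on the remaining lines.
def pvRunA {α : Type} (p : α → Bool) : List α → Int → Bool → List α
  | [], _, _ => []
  | l :: ls, c, isa =>
    let c' := if p l then c - 1 else c
    let isa' := if p l then true else isa
    let hd := if isa' then [l] else []
    let isa'' := if c' = 0 then false else isa'
    hd ++ pvRunA p ls c' isa''

-- index of the last p-satisfying element (meaningful only when one exists)
def pvLastT {α : Type} (p : α → Bool) : List α → Nat
  | [] => 0
  | _ :: ls => if ls.countP p = 0 then 0 else pvLastT p ls + 1

theorem pvFoldlCount {α : Type} (p : α → Bool) (ls : List α) :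
    ∀ (a : Int), ls.foldl (fun c l => if p l then c + 1 else c) a = a + ls.countP p := by
  induction ls with
  | nil => simp
  | cons l ls ih =>
      intro a
      by_cases h : p l = true <;> simp [List.foldl, h, ih] <;> omega

theorem pvFoldlA {α : Type} (p : α → Bool) (ls : List α) :
    ∀ (acc : List α) (c : Int) (isa : Bool),
      (ls.foldl
        (fun (s : List α × Int × Bool) line =>
          let acc := s.1
          let c := if p line then s.2.1 - 1 else s.2.1
          let isa := if p line then true else s.2.2
          let acc := if isa then acc ++ [line] else acc
          let isa := if c = 0 then false else isa
          (acc, c, isa))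
        (acc, c, isa)).1 = acc ++ pvRunA p ls c isa := by
  induction ls with
  | nil => intro acc c isa; simp [pvRunA]
  | cons l ls ih =>
      intro acc c isa
      simp only [List.foldl, pvRunA]
      rw [ih]
      by_cases h : p l = true <;> by_cases h2 : (if p l then c - 1 else c) = 0 <;>
        by_cases h3 : isa = true <;> simp [h, h2, h3]

theorem pvRunA_zero {α : Type} (p : α → Bool) (ls : List α) (h : ls.countP p = 0) :
    pvRunA p ls 0 false = [] := by
  induction ls with
  | nil => simp [pvRunA]
  | cons l ls ih =>
      simp only [List.countP_cons] at h
      have hl : p l = false := by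
        cases hpl : p l
        · rfl
        · exfalso; simp [hpl] at h
      have hls : ls.countP p = 0 := by omega
      simp [pvRunA, hl, ih hls]

theorem pvRunA_true {α : Type} (p : α → Bool) (ls : List α) :
    ∀ (c : Nat), 0 < c → ls.countP p = c →
      pvRunA p ls (c : Int) true = ls.take (pvLastT p ls + 1) := by
  induction ls with
  | nil => intro c hc h; simp at h; omega
  | cons l ls ih =>
      intro c hc h
      simp only [List.countP_cons] at h
      by_cases hl : p l = true
      · simp only [hl, if_pos] at h
        rcases Nat.lt_or_ge 1 c with h2 | h2
        · -- c > 1 : tail still tagged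
          have hls : ls.countP p = c - 1 := by omega
          have hne : (c : Int) - 1 ≠ 0 := by omega
          have hcast : ((c : Nat) : Int) - 1 = ((c - 1 : Nat) : Int) := by omega
          simp only [pvRunA, hl, if_pos, if_neg hne, pvLastT]
          rw [hcast, ih (c - 1) (by omega) hls]
          have : ls.countP p ≠ 0 := by omega
          simp [this, List.take_succ_cons]
        · -- c = 1 : head is the only remaining tagged line
          have hc1 : c = 1 := by omega
          have hls : ls.countP p = 0 := by omega
          subst hc1
          simp [pvRunA, hl, pvLastT, hls, pvRunA_zero p ls hls]
      · simp only [Bool.not_eq_true] at hl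
        simp only [hl, Bool.false_eq_true, if_false] at h
        have hne : (c : Int) ≠ 0 := by omega
        simp only [pvRunA, hl, Bool.false_eq_true, if_false, if_neg hne, pvLastT]
        rw [ih c hc h]
        have : ls.countP p ≠ 0 := by omega
        simp [this, List.take_succ_cons]

-- the state machine, started from the full count, yields the slice
theorem pvRunA_main {α : Type} (p : α → Bool) (ls : List α) :
    pvRunA p ls (ls.countP p : Int) false =
      if ls.countP p = 0 then []
      else (ls.drop (ls.findIdx p)).take (pvLastT p ls + 1 - ls.findIdx p) := by
  induction ls with
  | nil => simp [pvRunA]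
  | cons l ls ih =>
      by_cases hl : p l = true
      · have hcnt : (l :: ls).countP p = ls.countP p + 1 := by simp [List.countP_cons, hl]
        have hfi : (l :: ls).findIdx p = 0 := by simp [List.findIdx_cons, hl]
        by_cases h0 : ls.countP p = 0
        · have : ((ls.countP p + 1 : Nat) : Int) - 1 = 0 := by omega
          simp [pvRunA, hcnt, hl, hfi, this, pvRunA_zero p ls h0, pvLastT, h0]
        · have hne : ((ls.countP p + 1 : Nat) : Int) - 1 ≠ 0 := by omega
          have hcast : ((ls.countP p + 1 : Nat) : Int) - 1 = ((ls.countP p : Nat) : Int) := by omega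
          simp only [pvRunA, hcnt, hl, if_pos, hcast, if_neg hne, hfi]
          have hne2 : ((ls.countP p : Nat) : Int) ≠ 0 := by omega
          rw [if_neg hne2, pvRunA_true p ls (ls.countP p) (by omega) rfl]
          have hne3 : ls.countP p + 1 ≠ 0 := by omega
          simp [hne3, pvLastT, h0, List.take_succ_cons]
      · simp only [Bool.not_eq_true] at hl
        have hcnt : (l :: ls).countP p = ls.countP p := by simp [List.countP_cons, hl]
        have hfi : (l :: ls).findIdx p = ls.findIdx p + 1 := by
          simp [List.findIdx_cons, hl]
        by_cases h0 : ls.countP p = 0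
        · have hz : ((l :: ls).countP p : Int) = 0 := by simp [hcnt, h0]
          rw [hz, pvRunA_zero p (l :: ls) (by simp [hcnt, h0])]
          simp [hcnt, h0]
        · have hne : ((ls.countP p : Nat) : Int) ≠ 0 := by omega
          simp only [pvRunA, hcnt, hl, Bool.false_eq_true, if_false, if_neg hne]
          rw [ih]
          simp only [h0, if_false, hfi, pvLastT]
          have harith : pvLastT p ls + 1 + 1 - (ls.findIdx p + 1) = pvLastT p ls + 1 - ls.findIdx p := by
            omega
          simp [h0, harith]

-- B's index list, generalised over the enumerate start
def pvIdx {α : Type} (p : α → Bool) (ls : List α) (s : Int) : List Int :=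
  ((PySem.List.enumerate ls s).filter (fun q => p q.2)).map (·.1)

theorem pvIdx_cons {α : Type} (p : α → Bool) (l : α) (ls : List α) (s : Int) :
    pvIdx p (l :: ls) s = if p l then s :: pvIdx p ls (s + 1) else pvIdx p ls (s + 1) := by
  by_cases h : p l = true <;> simp [pvIdx, PySem.List.enumerate_cons, h]

theorem pvIdx_nil_iff {α : Type} (p : α → Bool) (ls : List α) (s : Int) :
    pvIdx p ls s = [] ↔ ls.countP p = 0 := by
  induction ls generalizing s with
  | nil => simp [pvIdx]
  | cons l ls ih =>
      rw [pvIdx_cons]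
      by_cases h : p l = true <;> simp [h, List.countP_cons, ih]

theorem pvIdx_head {α : Type} (p : α → Bool) (ls : List α) (s : Int)
    (h : ls.countP p ≠ 0) : (pvIdx p ls s).head? = some (s + ls.findIdx p) := by
  induction ls generalizing s with
  | nil => simp at h
  | cons l ls ih =>
      rw [pvIdx_cons]
      by_cases hl : p l = true
      · simp [hl, List.findIdx_cons]
      · simp only [Bool.not_eq_true] at hl
        have h' : ls.countP p ≠ 0 := by
          intro hz; apply h; simp [List.countP_cons, hl, hz]
        rw [if_neg (by simp [hl]), ih (s + 1) h']
        simp [List.findIdx_cons, hl]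
        omega

theorem pvGetLast?_cons {γ : Type} (x : γ) (xs : List γ) (h : xs ≠ []) :
    (x :: xs).getLast? = xs.getLast? := by
  cases xs with
  | nil => simp at h
  | cons b bs => simp [List.getLast?_cons_cons]

theorem pvIdx_last {α : Type} (p : α → Bool) (ls : List α) (s : Int)
    (h : ls.countP p ≠ 0) : (pvIdx p ls s).getLast? = some (s + pvLastT p ls) := by
  induction ls generalizing s with
  | nil => simp at h
  | cons l ls ih =>
      rw [pvIdx_cons]
      by_cases h0 : ls.countP p = 0
      · have hl : p l = true := by
          cases hpl : p l
          · simp [List.countP_cons, hpl, h0] at h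
          · rfl
        have hnil : pvIdx p ls (s + 1) = [] := (pvIdx_nil_iff p ls (s + 1)).mpr h0
        simp [hl, hnil, pvLastT, h0]
      · have htail := ih (s + 1) h0
        have hne : pvIdx p ls (s + 1) ≠ [] := by
          intro hc; exact h0 ((pvIdx_nil_iff p ls (s + 1)).mp hc)
        by_cases hl : p l = true
        · rw [if_pos hl, pvGetLast?_cons _ _ hne, htail]
          simp [pvLastT, h0]; omega
        · simp only [Bool.not_eq_true] at hl
          rw [if_neg (by simp [hl]), htail]
          simp [pvLastT, h0]; omega

-- both ports, stated over the already-split list of lines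
theorem pvPorts_eq (ls : List String) :
    PySem.Str.join ""
      ((ls.foldl
        (fun (s : List String × Int × Bool) line =>
          let acc := s.1
          let c := if PySem.Str.isIn "article" line then s.2.1 - 1 else s.2.1
          let isa := if PySem.Str.isIn "article" line then true else s.2.2
          let acc := if isa then acc ++ [line] else acc
          let isa := if c = 0 then false else isa
          (acc, c, isa))
        ([], ls.foldl (fun c line => if PySem.Str.isIn "article" line then c + 1 else c) 0,
          false)).1)
    = (match ((PySem.List.enumerate ls 0).filter
          (fun q => PySem.Str.isIn "article" q.2)).map (·.1) with
       | [] => ""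
       | i :: rest =>
          PySem.Str.join "" (PySem.List.slice ls (some i)
            (some ((i :: rest).getLast (List.cons_ne_nil i rest) + 1)))) := by
  set p : String → Bool := fun line => PySem.Str.isIn "article" line with hp
  rw [pvFoldlCount p ls 0, pvFoldlA p ls [] _ false]
  have hscrut : ((PySem.List.enumerate ls 0).filter (fun q => p q.2)).map (·.1)
      = pvIdx p ls 0 := rfl
  rw [hscrut]
  have hc : (0 : Int) + ls.countP p = ((ls.countP p : Nat) : Int) := by omega
  rw [List.nil_append, hc, pvRunA_main p ls]
  by_cases h0 : ls.countP p = 0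
  · rw [(pvIdx_nil_iff p ls 0).mpr h0]
    simp [h0]
    rfl
  · have hidx_ne : pvIdx p ls 0 ≠ [] := by
      intro hc'; exact h0 ((pvIdx_nil_iff p ls 0).mp hc')
    obtain ⟨i, rest, hcons⟩ := List.exists_cons_of_ne_nil hidx_ne
    have hh := pvIdx_head p ls 0 h0
    have hl := pvIdx_last p ls 0 h0
    rw [hcons] at hh hl
    have hi : i = ((ls.findIdx p : Nat) : Int) := by
      have := hh; simp at this; omega
    have hlast : (i :: rest).getLast (List.cons_ne_nil i rest) + 1
        = ((pvLastT p ls + 1 : Nat) : Int) := by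
      have h1 := List.getLast?_eq_some_getLast (l := i :: rest) (List.cons_ne_nil i rest)
      rw [h1] at hl
      have h2 : (i :: rest).getLast (List.cons_ne_nil i rest) = 0 + pvLastT p ls := by
        simpa using hl
      rw [h2]; push_cast; omega
    rw [hcons]
    simp only [h0, if_false]
    rw [hlast, hi, PySem.List.slice_natCast]

theorem filter_articles_eq_alt (raw_html : String) :
    filter_articles raw_html = filter_articles_alt raw_html := by
  unfold filter_articles filter_articles_alt
  exact pvPorts_eq ((PySem.Str.split? raw_html "\n").getD [])

-- ===== VERDICT (by name: the statement is the Claim_ definition above) =====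
theorem filter_articles_spec : Claim_equal_filter_articles := by
  intro raw_html _
  unfold Spec_filter_articles
  exact filter_articles_eq_alt raw_html
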